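-- pv_equiv track=rewrite | github.com/Trololocos/Starcraft-float-CC | mining.py | calcRate
-- ===== SOURCE A (Python) =====
-- normal = 40
--
-- overs = 20
--
-- def calcRate(workers, patchNum):
--     patches = [0] * patchNum
--     rate = 0
--     for i,s in enumerate(patches):
--         if workers >= 3:
--             patches[i] = 2
--             workers -= 2
--         else:
--             patches[i] = workers
--             workers = 0
--     for i,s in enumerate(patches): #calculate how many oversaturated workers there are
--         if workers:
--             patches[i]+=1
--             workers-=1
--         else:
--             break
--     for i in patches:
--         if i == 1:
--             rate += normal
--         elif i == 2:
--             rate += normal * 2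
--         elif i == 3:
--             rate += normal * 2 + overs
--     return rate
-- ===== SOURCE B (Python) =====
-- def calcRate(workers, patchNum):
--     # Closed form: each of the first min(workers, 2n) worker slots mines 40,
--     # each oversaturated worker (beyond 2 per patch, at most 1 extra per patch) adds 20.
--     n = max(patchNum, 0)
--     if workers <= 0 or n == 0:
--         return 0
--     if workers <= 2 * n:
--         return 40 * workers
--     return 80 * n + 20 * min(workers - 2 * n, n)
-- ===== Notes on version B (the rewrite author's own statement) =====
-- stated objective: faster
-- what changed: Replaced A's three O(patchNum) per-patch loops (distribute 2 workers per patch, then one extra each, then sum per-patch rates) by O(1) closed-form arithmetic: 40 per worker up to 2 per patch, plus 20 per oversaturated worker capped at one per patch.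
import Mathlib
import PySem

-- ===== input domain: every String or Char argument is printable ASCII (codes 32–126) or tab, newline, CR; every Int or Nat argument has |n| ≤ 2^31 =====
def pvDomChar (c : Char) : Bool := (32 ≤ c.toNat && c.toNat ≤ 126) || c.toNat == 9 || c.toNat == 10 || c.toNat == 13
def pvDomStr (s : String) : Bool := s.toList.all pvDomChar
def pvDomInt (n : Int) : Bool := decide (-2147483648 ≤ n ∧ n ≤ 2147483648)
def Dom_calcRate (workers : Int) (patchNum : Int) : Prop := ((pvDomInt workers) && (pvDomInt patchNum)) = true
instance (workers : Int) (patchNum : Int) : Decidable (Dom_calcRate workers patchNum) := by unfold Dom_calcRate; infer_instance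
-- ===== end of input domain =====

-- B replaces A's three per-patch loops by O(1) closed-form arithmetic (faster, asymptotic).

-- ===== PORT A =====
def pvNormal : Int := 40
def pvOvers : Int := 20

-- first loop: assign 2 (or the remaining workers) to each patch in order
-- (accumulator style so evaluation does not overflow the stack on long patch lists)
def calcRate_loop1Go : List Int → Int → List Int → (List Int × Int)
  | [], w, acc => (acc.reverse, w)
  | _ :: rest, w, acc =>
    if w ≥ 3 then calcRate_loop1Go rest (w - 2) (2 :: acc)
    else calcRate_loop1Go rest 0 (w :: acc)

def calcRate_loop1 (xs : List Int) (w : Int) : List Int × Int := calcRate_loop1Go xs w []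

-- second loop: hand one extra worker to each patch while workers remain ('if workers' = w ≠ 0), else break
def calcRate_loop2Go : List Int → Int → List Int → List Int
  | [], _, acc => acc.reverse
  | p :: rest, w, acc =>
    if w ≠ 0 then calcRate_loop2Go rest (w - 1) ((p + 1) :: acc)
    else acc.reverse ++ (p :: rest)

def calcRate_loop2 (xs : List Int) (w : Int) : List Int := calcRate_loop2Go xs w []

def calcRate (workers : Int) (patchNum : Int) : Int :=
  let patches := List.replicate patchNum.toNat (0 : Int)  -- [0]*patchNum ([] for negative patchNum)
  let r1 := calcRate_loop1 patches workers
  let p2 := calcRate_loop2 r1.1 r1.2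
  p2.foldl (fun rate i =>
    if i == 1 then rate + pvNormal
    else if i == 2 then rate + pvNormal * 2
    else if i == 3 then rate + pvNormal * 2 + pvOvers
    else rate) 0

-- ===== PORT B =====
def calcRate_alt (workers : Int) (patchNum : Int) : Int :=
  let n := max patchNum 0
  if workers ≤ 0 || n == 0 then 0
  else if workers ≤ 2 * n then 40 * workers
  else 80 * n + 20 * min (workers - 2 * n) n

-- ===== PRECONDITION & SPEC =====
def Spec_calcRate (workers : Int) (patchNum : Int) (out : Int) : Prop := out = calcRate_alt workers patchNum
instance (workers : Int) (patchNum : Int) (out : Int) : Decidable (Spec_calcRate workers patchNum out) := by unfold Spec_calcRate; infer_instance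

-- ===== CLAIM (what is proved, stated in full; the proofs are below) =====
def Claim_equal_calcRate : Prop := ∀ (workers : Int) (patchNum : Int), Dom_calcRate workers patchNum → Spec_calcRate workers patchNum (calcRate workers patchNum)

-- ===== LEMMAS AND PROOFS =====

-- simple structural versions of the two loops, used only in the proofs
def pvLoop1 : List Int → Int → (List Int × Int)
  | [], w => ([], w)
  | _ :: rest, w =>
    if w ≥ 3 then
      let r := pvLoop1 rest (w - 2); (2 :: r.1, r.2)
    else
      let r := pvLoop1 rest 0; (w :: r.1, r.2)

def pvLoop2 : List Int → Int → List Int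
  | [], _ => []
  | p :: rest, w => if w ≠ 0 then (p + 1) :: pvLoop2 rest (w - 1) else p :: rest

lemma loop1Go_eq (xs : List Int) : ∀ (w : Int) (acc : List Int),
    calcRate_loop1Go xs w acc = (acc.reverse ++ (pvLoop1 xs w).1, (pvLoop1 xs w).2) := by
  induction xs with
  | nil => intro w acc; simp [calcRate_loop1Go, pvLoop1]
  | cons x rest ih =>
    intro w acc
    by_cases h : w ≥ 3 <;> simp [calcRate_loop1Go, pvLoop1, h, ih]

lemma loop1_eq_pvLoop1 (xs : List Int) (w : Int) : calcRate_loop1 xs w = pvLoop1 xs w := by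
  simp [calcRate_loop1, loop1Go_eq]

lemma loop2Go_eq (xs : List Int) : ∀ (w : Int) (acc : List Int),
    calcRate_loop2Go xs w acc = acc.reverse ++ pvLoop2 xs w := by
  induction xs with
  | nil => intro w acc; simp [calcRate_loop2Go, pvLoop2]
  | cons x rest ih =>
    intro w acc
    by_cases h : w = 0 <;> simp [calcRate_loop2Go, pvLoop2, h, ih]

lemma loop2_eq_pvLoop2 (xs : List Int) (w : Int) : calcRate_loop2 xs w = pvLoop2 xs w := by
  simp [calcRate_loop2, loop2Go_eq]

def pvF (i : Int) : Int :=
  if i == 1 then pvNormal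
  else if i == 2 then pvNormal * 2
  else if i == 3 then pvNormal * 2 + pvOvers
  else 0

def pvRate (xs : List Int) : Int := (xs.map pvF).sum

lemma foldl_rate (xs : List Int) (c : Int) :
    xs.foldl (fun rate i =>
      if i == 1 then rate + pvNormal
      else if i == 2 then rate + pvNormal * 2
      else if i == 3 then rate + pvNormal * 2 + pvOvers
      else rate) c = c + pvRate xs := by
  induction xs generalizing c with
  | nil => simp [pvRate]
  | cons x xs ih =>
    simp only [List.foldl, pvRate, List.map, List.sum_cons, ih, pvF]
    split_ifs <;> simp_all <;> ring

lemma rate_replicate (m : Nat) (v : Int) :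
    pvRate (List.replicate m v) = m * pvF v := by
  induction m with
  | zero => simp [pvRate]
  | succ k ih =>
    simp only [List.replicate, pvRate, List.map, List.sum_cons] at *
    rw [ih]; push_cast; ring

lemma rate_cons (x : Int) (xs : List Int) : pvRate (x :: xs) = pvF x + pvRate xs := by
  simp [pvRate]

lemma loop2_zero (xs : List Int) : pvLoop2 xs 0 = xs := by
  cases xs <;> simp [pvLoop2]

lemma loop1_zero (m : Nat) :
    pvLoop1 (List.replicate m 0) 0 = (List.replicate m 0, 0) := by
  induction m with
  | zero => simp [pvLoop1]
  | succ k ih => simp [List.replicate, pvLoop1, ih]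

lemma loop1_small (k : Nat) (w : Int) (h : w ≤ 2) :
    pvLoop1 (List.replicate (k + 1) 0) w = (w :: List.replicate k 0, 0) := by
  simp [List.replicate, pvLoop1, loop1_zero, show ¬ (w ≥ 3) by omega]

lemma loop1_big (m : Nat) (w : Int) (h : 2 * m + 1 ≤ w) :
    pvLoop1 (List.replicate m 0) w = (List.replicate m 2, w - 2 * m) := by
  induction m generalizing w with
  | zero => simp [pvLoop1]
  | succ k ih =>
    have h3 : w ≥ 3 := by push_cast at h; omega
    have := ih (w - 2) (by omega)
    simp [List.replicate, pvLoop1, h3, this]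
    ring

lemma loop1_mid (m : Nat) (w : Int) (h1 : 1 ≤ w) (h2 : w ≤ 2 * m) :
    (pvLoop1 (List.replicate m 0) w).2 = 0 ∧
    pvRate (pvLoop1 (List.replicate m 0) w).1 = 40 * w := by
  induction m generalizing w with
  | zero => omega
  | succ k ih =>
    by_cases hw : w ≤ 2
    · rw [loop1_small k w hw]
      have : w = 1 ∨ w = 2 := by omega
      rcases this with h | h <;>
        simp [h, rate_cons, rate_replicate, pvF, pvNormal]
    · have h3 : w ≥ 3 := by omega
      obtain ⟨ha, hb⟩ := ih (w - 2) (by omega) (by push_cast at h2 ⊢; omega)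
      simp only [List.replicate, pvLoop1, ge_iff_le, h3, if_pos]
      refine ⟨ha, ?_⟩
      rw [rate_cons, hb]
      simp [pvF, pvNormal]; ring

lemma loop2_rep2 (m : Nat) (L : Int) (h : 0 ≤ L) :
    pvRate (pvLoop2 (List.replicate m 2) L) = 80 * m + 20 * min L m := by
  induction m generalizing L with
  | zero =>
    simp [pvLoop2, pvRate]
    omega
  | succ k ih =>
    by_cases hL : L = 0
    · subst hL
      simp [loop2_zero, rate_replicate, pvF, pvNormal]
      omega
    · have := ih (L - 1) (by omega)
      simp only [List.replicate, pvLoop2, hL, if_pos, ne_eq, not_false_iff]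
      rw [show (2 : Int) + 1 = 3 by norm_num, rate_cons, this]
      simp [pvF, pvNormal, pvOvers]
      omega

lemma calcRate_eq (workers patchNum : Int) :
    calcRate workers patchNum = calcRate_alt workers patchNum := by
  have hmax : ((patchNum.toNat : Int)) = max patchNum 0 := Int.toNat_eq_max patchNum
  unfold calcRate calcRate_alt
  dsimp only
  rw [loop1_eq_pvLoop1, loop2_eq_pvLoop2]
  rcases Nat.eq_zero_or_pos patchNum.toNat with hn | hn
  · -- no patches: every loop is trivial
    have hmx : max patchNum 0 = 0 := by rw [← hmax, hn]; simp
    rw [hn, hmx]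
    simp [pvLoop1, pvLoop2]
  · obtain ⟨k, hk⟩ : ∃ k, patchNum.toNat = k + 1 := ⟨patchNum.toNat - 1, by omega⟩
    rw [hk] at hmax ⊢
    by_cases hw : workers ≤ 0
    · -- nonpositive workers: first patch absorbs them, rate 0
      rw [loop1_small k workers (by omega), loop2_zero, foldl_rate, rate_cons, rate_replicate]
      have hf : pvF workers = 0 := by
        simp [pvF, show workers ≠ 1 by omega,
          show workers ≠ 2 by omega, show workers ≠ 3 by omega]
      have hf0 : pvF 0 = 0 := by simp [pvF]
      rw [hf, hf0, if_pos (by simp [hw])]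
      ring
    · by_cases hmid : workers ≤ 2 * ((k : Int) + 1)
      · -- undersaturated: rate = 40 * workers
        obtain ⟨ha, hb⟩ := loop1_mid (k + 1) workers (by omega) (by push_cast; omega)
        rw [ha, loop2_zero, foldl_rate, hb]
        rw [if_neg (by simp [← hmax]; omega),
          if_pos (by rw [← hmax]; push_cast; omega)]
        ring
      · -- oversaturated: all patches at 2, leftover adds 20 each up to one per patch
        rw [loop1_big (k + 1) workers (by omega)]
        rw [foldl_rate, loop2_rep2 (k + 1) _ (by omega)]
        rw [if_neg (by simp [← hmax]; omega),
          if_neg (by rw [← hmax]; push_cast at hmid ⊢; omega)]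
        rw [← hmax]
        push_cast
        omega

-- ===== VERDICT (by name: the statement is the Claim_ definition above) =====
theorem calcRate_spec : Claim_equal_calcRate := by
  intro workers patchNum _
  exact calcRate_eq workers patchNum
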